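-- pv_equiv track=rewrite | github.com/Sampathallu/QA_system-NLP | QAsystemFinal.py | whatScore
-- ===== SOURCE A (Python) =====
-- CLUE = 3
--
-- GOOD_CLUE = 5
--
-- SLAM_DUNK = 10
--
-- def cleanWord(word):
--     alphabets = ['$', '-', '0', '1', '2', '3', '4', '5', '6', '7', '8', '9', 'a', 'b', 'c', 'd', 'e', 'f', 'g', 'h', 'i', 'j', 'k', 'l', 'm', 'n', 'o', 'p', 'q', 'r', 's', 't', 'u', 'v', 'w', 'x', 'y', 'z']
--     newWord = ""
--     for ch in word:
--         if ch.lower() in alphabets: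
--             newWord += ch
--     return newWord.strip(" ")
--
-- def whatScore(qKeyWords, paraLine, ansNer, pKeyWords):
--     score = 0
--     applyKindRule = False
--     applyNameRule = False
--     applyDateRule = False
--     for word in qKeyWords:
--         if word.lower() == "kind":
--             applyKindRule = True
--         elif word.lower().find("name") != -1:
--             applyNameRule = True
--         elif word.lower() in ["month", "year", "date", "time"]:
--             applyDateRule = True
--     if applyDateRule:
--         for word in paraLine.split(" "):
--             word = cleanWord(word)
--             if word.lower().find('today') != -1 or word.lower().find('yesterday') != -1 or word.lower().find('tomorrow') != -1 or word.lower().find('night') != -1 or word.lower().find('day') != -1: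
--                 score += CLUE
--     if applyKindRule:
--         for word in paraLine.split(" "):
--             word = cleanWord(word)
--             if word.lower().find('call') != -1 or  word.lower().find('from') != -1:
--                 score += GOOD_CLUE
--     if applyNameRule:
--         for word in paraLine.split(" "):
--             word = cleanWord(word)
--             if word.lower().find('name') != -1 or word.lower().find('call') != -1 or word.lower().find('known') != -1:
--                 score += SLAM_DUNK
--     return score
-- ===== SOURCE B (Python) =====
-- CLUE = 3
-- GOOD_CLUE = 5
-- SLAM_DUNK = 10
--
-- ALPHABET = set('$-0123456789abcdefghijklmnopqrstuvwxyz')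
-- DATE_HITS = ("today", "yesterday", "tomorrow", "night", "day")
-- KIND_HITS = ("call", "from")
-- NAME_HITS = ("name", "call", "known")
--
-- def whatScore(qKeyWords, paraLine, ansNer, pKeyWords):
--     lowers = [w.lower() for w in qKeyWords]
--     applyKindRule = "kind" in lowers
--     applyNameRule = any("name" in w for w in lowers)
--     applyDateRule = any(w in ("month", "year", "date", "time") for w in lowers)
--     score = 0
--     for word in paraLine.split(" "):
--         low = ''.join(ch for ch in word.lower() if ch in ALPHABET)
--         if applyDateRule and any(h in low for h in DATE_HITS):
--             score += CLUE
--         if applyKindRule and any(h in low for h in KIND_HITS):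
--             score += GOOD_CLUE
--         if applyNameRule and any(h in low for h in NAME_HITS):
--             score += SLAM_DUNK
--     return score
-- ===== Notes on version B (the rewrite author's own statement) =====
-- stated objective: simpler
-- what changed: B replaces A's three separate guarded scans of the paragraph by a single fused pass that cleans and lowercases each word once and adds all three rule bonuses, computing the three flags as independent any/membership tests instead of A's stateful elif loop.
import Mathlib
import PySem

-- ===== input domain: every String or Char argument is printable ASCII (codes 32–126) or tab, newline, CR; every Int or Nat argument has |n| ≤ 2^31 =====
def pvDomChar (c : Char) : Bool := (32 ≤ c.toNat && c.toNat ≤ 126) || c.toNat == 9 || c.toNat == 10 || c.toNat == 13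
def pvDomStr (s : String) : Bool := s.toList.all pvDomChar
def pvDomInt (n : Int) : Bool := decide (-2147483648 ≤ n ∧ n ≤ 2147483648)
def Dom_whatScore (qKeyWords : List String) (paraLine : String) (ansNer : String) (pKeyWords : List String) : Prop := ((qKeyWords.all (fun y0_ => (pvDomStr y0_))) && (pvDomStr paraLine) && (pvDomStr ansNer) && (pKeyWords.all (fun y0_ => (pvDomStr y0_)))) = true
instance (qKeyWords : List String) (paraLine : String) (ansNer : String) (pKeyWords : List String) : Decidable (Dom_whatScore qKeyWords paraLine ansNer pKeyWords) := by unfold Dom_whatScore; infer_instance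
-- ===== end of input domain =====

-- B fuses A's three separate scans of the paragraph into one table-driven pass that
-- cleans/lowercases each word once and computes the three rule flags as independent
-- any-tests; objective: simpler (same O(n) cost).

-- paraLine.split(" "): sep is the nonempty literal " ", so Python's split is exactly Chars.splitOn
def wsSplit (s : String) : List String :=
  (PySem.Chars.splitOn s.toList " ".toList).map String.ofList

-- ===== PORT A =====
def wsAlphabets : List Char := ['$', '-', '0', '1', '2', '3', '4', '5', '6', '7', '8', '9', 'a', 'b', 'c', 'd', 'e', 'f', 'g', 'h', 'i', 'j', 'k', 'l', 'm', 'n', 'o', 'p', 'q', 'r', 's', 't', 'u', 'v', 'w', 'x', 'y', 'z']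

def cleanWord (word : String) : String :=
  let newWord := word.toList.foldl
    (fun nw ch => if wsAlphabets.contains (PySem.Chars.lowerChar ch) then nw.push ch else nw) ""
  PySem.Str.stripChars newWord " "

def whatScore (qKeyWords : List String) (paraLine : String) (ansNer : String) (pKeyWords : List String) : Int :=
  let flags := qKeyWords.foldl
    (fun (f : Bool × Bool × Bool) word =>
      if PySem.Str.lower word == "kind" then (true, f.2.1, f.2.2)
      else if PySem.Str.find (PySem.Str.lower word) "name" != -1 then (f.1, true, f.2.2)
      else if ["month", "year", "date", "time"].contains (PySem.Str.lower word) then (f.1, f.2.1, true)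
      else f)
    (false, false, false)
  let score : Int := 0
  let score := if flags.2.2 then
      (wsSplit paraLine).foldl (fun s word =>
        let w := cleanWord word
        if (PySem.Str.find (PySem.Str.lower w) "today" != -1) || (PySem.Str.find (PySem.Str.lower w) "yesterday" != -1) || (PySem.Str.find (PySem.Str.lower w) "tomorrow" != -1) || (PySem.Str.find (PySem.Str.lower w) "night" != -1) || (PySem.Str.find (PySem.Str.lower w) "day" != -1)
        then s + 3 else s) score
    else score
  let score := if flags.1 then
      (wsSplit paraLine).foldl (fun s word =>
        let w := cleanWord word
        if (PySem.Str.find (PySem.Str.lower w) "call" != -1) || (PySem.Str.find (PySem.Str.lower w) "from" != -1)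
        then s + 5 else s) score
    else score
  let score := if flags.2.1 then
      (wsSplit paraLine).foldl (fun s word =>
        let w := cleanWord word
        if (PySem.Str.find (PySem.Str.lower w) "name" != -1) || (PySem.Str.find (PySem.Str.lower w) "call" != -1) || (PySem.Str.find (PySem.Str.lower w) "known" != -1)
        then s + 10 else s) score
    else score
  score

-- ===== PORT B =====
def wsAlphabetSet : List Char := "$-0123456789abcdefghijklmnopqrstuvwxyz".toList

-- ''.join(ch for ch in word.lower() if ch in ALPHABET)
def cleanLower (word : String) : String :=
  String.ofList ((PySem.Str.lower word).toList.filter (fun ch => wsAlphabetSet.contains ch))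

def whatScore_alt (qKeyWords : List String) (paraLine : String) (ansNer : String) (pKeyWords : List String) : Int :=
  let lowers := qKeyWords.map PySem.Str.lower
  let applyKindRule := lowers.contains "kind"
  let applyNameRule := lowers.any (fun w => PySem.Str.isIn "name" w)
  let applyDateRule := lowers.any (fun w => ["month", "year", "date", "time"].contains w)
  (wsSplit paraLine).foldl
    (fun score word =>
      let low := cleanLower word
      let score := if applyDateRule && ["today", "yesterday", "tomorrow", "night", "day"].any (fun h => PySem.Str.isIn h low) then score + 3 else score
      let score := if applyKindRule && ["call", "from"].any (fun h => PySem.Str.isIn h low) then score + 5 else score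
      if applyNameRule && ["name", "call", "known"].any (fun h => PySem.Str.isIn h low) then score + 10 else score)
    0

-- ===== PRECONDITION & SPEC =====
def Spec_whatScore (qKeyWords : List String) (paraLine : String) (ansNer : String) (pKeyWords : List String) (out : Int) : Prop := out = whatScore_alt qKeyWords paraLine ansNer pKeyWords
instance (qKeyWords : List String) (paraLine : String) (ansNer : String) (pKeyWords : List String) (out : Int) : Decidable (Spec_whatScore qKeyWords paraLine ansNer pKeyWords out) := by unfold Spec_whatScore; infer_instance

-- ===== CLAIM (what is proved, stated in full; the proofs are below) =====
def Claim_equal_whatScore : Prop := ∀ (qKeyWords : List String) (paraLine : String) (ansNer : String) (pKeyWords : List String), Dom_whatScore qKeyWords paraLine ansNer pKeyWords → Spec_whatScore qKeyWords paraLine ansNer pKeyWords (whatScore qKeyWords paraLine ansNer pKeyWords)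

-- ===== LEMMAS AND PROOFS =====

-- s.find(sub) != -1 is the same boolean as `sub in s`
lemma find_bne_eq_isIn (sub s : List Char) :
    (PySem.Chars.find s sub != -1) = PySem.Chars.isIn sub s := by
  by_cases h : sub <:+: s
  · have h1 : PySem.Chars.find s sub ≠ -1 := (PySem.Chars.find_ne_neg_one_iff s sub).mpr h
    have h2 : PySem.Chars.isIn sub s = true := (PySem.Chars.isIn_iff_infix sub s).mpr h
    simp [bne_iff_ne, h1, h2]
  · have h1 : PySem.Chars.find s sub = -1 := (PySem.Chars.find_eq_neg_one_iff s sub).mpr h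
    have h2 : PySem.Chars.isIn sub s = false := (PySem.Chars.isIn_eq_false_iff sub s).mpr h
    simp [h1, h2]

lemma find_bne_eq_isIn_str (sub s : String) :
    (PySem.Str.find s sub != -1) = PySem.Str.isIn sub s := by
  simp [find_bne_eq_isIn]

lemma foldl_push_toList (l : List Char) (p : Char → Bool) (s : String) :
    (l.foldl (fun nw ch => if p ch then nw.push ch else nw) s).toList
      = s.toList ++ l.filter p := by
  induction l generalizing s with
  | nil => simp
  | cons x t ih =>
    by_cases h : p x
    · simp [h, ih]
    · simp [h, ih]

-- lowering commutes with A's cleaning: lower(cleanWord w) = cleanLower w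
lemma dropWhile_of_all_neg (chars : List Char) (m : List Char)
    (hm : ∀ c ∈ m, chars.contains c = false) :
    List.dropWhile (fun c => chars.contains c) m = m := by
  cases m with
  | nil => rfl
  | cons a t =>
    have ha : chars.contains a = false := hm a (List.mem_cons_self ..)
    refine List.dropWhile_cons_of_neg ?_
    simpa using ha

lemma stripChars_of_all_neg (l chars : List Char) (h : ∀ c ∈ l, chars.contains c = false) :
    PySem.Chars.stripChars l chars = l := by
  simp only [PySem.Chars.stripChars]
  rw [dropWhile_of_all_neg chars l h,
      dropWhile_of_all_neg chars l.reverse (fun c hc => h c (List.mem_reverse.mp hc)),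
      List.reverse_reverse]

lemma map_filter_comp {α β : Type} (f : α → β) (p : β → Bool) (l : List α) :
    (l.filter (fun x => p (f x))).map f = (l.map f).filter p := by
  induction l with
  | nil => rfl
  | cons x t ih =>
    by_cases h : p (f x)
    · simp [h, ih]
    · simp [h, ih]

lemma lower_cleanWord (w : String) :
    PySem.Str.lower (cleanWord w) = cleanLower w := by
  apply String.toList_inj.mp
  simp only [cleanWord, cleanLower, PySem.Str.toList_lower, PySem.Str.toList_stripChars,
    String.toList_ofList]
  rw [foldl_push_toList]
  rw [show ("" : String).toList = [] from rfl, List.nil_append]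
  rw [stripChars_of_all_neg _ _ ?hns]
  case hns =>
    intro c hc
    have hmem := List.of_mem_filter hc
    have hone : " ".toList = [' '] := rfl
    rw [hone]
    cases hsp : ([' '] : List Char).contains c
    · rfl
    · exfalso
      have : c = ' ' := by simpa using hsp
      subst this
      exact absurd hmem (by decide)
  have hset : wsAlphabetSet = wsAlphabets := by decide
  rw [hset]
  unfold PySem.Chars.lower
  exact map_filter_comp PySem.Chars.lowerChar (fun ch => wsAlphabets.contains ch) w.toList

-- A's elif flag scan computes B's three independent any-flags
lemma flags_spec (l : List String) (f : Bool × Bool × Bool) :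
    l.foldl
      (fun (f : Bool × Bool × Bool) word =>
        if PySem.Str.lower word == "kind" then (true, f.2.1, f.2.2)
        else if PySem.Str.find (PySem.Str.lower word) "name" != -1 then (f.1, true, f.2.2)
        else if ["month", "year", "date", "time"].contains (PySem.Str.lower word) then (f.1, f.2.1, true)
        else f) f
    = (f.1 || l.any (fun w => PySem.Str.lower w == "kind"),
       f.2.1 || l.any (fun w => PySem.Str.isIn "name" (PySem.Str.lower w)),
       f.2.2 || l.any (fun w => ["month", "year", "date", "time"].contains (PySem.Str.lower w))) := by
  induction l generalizing f with
  | nil => simp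
  | cons x t ih =>
    have hstep :
        (if PySem.Str.lower x == "kind" then (true, f.2.1, f.2.2)
         else if PySem.Str.find (PySem.Str.lower x) "name" != -1 then (f.1, true, f.2.2)
         else if ["month", "year", "date", "time"].contains (PySem.Str.lower x) then (f.1, f.2.1, true)
         else f)
        = (f.1 || (PySem.Str.lower x == "kind"),
           f.2.1 || PySem.Str.isIn "name" (PySem.Str.lower x),
           f.2.2 || ["month", "year", "date", "time"].contains (PySem.Str.lower x)) := by
      by_cases h1 : PySem.Str.lower x == "kind"
      · have hx : PySem.Str.lower x = "kind" := by simpa using h1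
        have hn : PySem.Str.isIn "name" (PySem.Str.lower x) = false := by rw [hx]; decide
        have hd : (["month", "year", "date", "time"].contains (PySem.Str.lower x)) = false := by
          rw [hx]; decide
        rw [if_pos h1, h1, hn, hd]
        simp
      · have h1' : (PySem.Str.lower x == "kind") = false := by simpa using h1
        rw [if_neg h1]
        by_cases h2 : PySem.Str.find (PySem.Str.lower x) "name" != -1
        · have hn : PySem.Str.isIn "name" (PySem.Str.lower x) = true := by
            rw [← find_bne_eq_isIn_str]; exact h2
          have hd : (["month", "year", "date", "time"].contains (PySem.Str.lower x)) = false := by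
            cases hmem : ["month", "year", "date", "time"].contains (PySem.Str.lower x)
            · rfl
            · exfalso
              have hm : PySem.Str.lower x = "month" ∨ PySem.Str.lower x = "year" ∨ PySem.Str.lower x = "date" ∨ PySem.Str.lower x = "time" := by
                simpa using hmem
              rcases hm with hm | hm | hm | hm <;>
                (rw [hm] at h2; exact absurd h2 (by decide))
          rw [if_pos h2, h1', hn, hd]
          simp
        · have h2' : (PySem.Str.find (PySem.Str.lower x) "name" != -1) = false := by
            simpa using h2
          have hn : PySem.Str.isIn "name" (PySem.Str.lower x) = false := by
            rw [← find_bne_eq_isIn_str]; exact h2'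
          rw [if_neg h2]
          by_cases h3 : ["month", "year", "date", "time"].contains (PySem.Str.lower x)
          · rw [if_pos h3, h1', hn, h3]
            simp
          · have h3' : (["month", "year", "date", "time"].contains (PySem.Str.lower x)) = false := by
              simpa using h3
            rw [if_neg h3, h1', hn, h3']
            simp
    rw [List.foldl_cons, hstep, ih]
    simp [Bool.or_assoc]

-- a guarded conditional-accumulate fold is a sum
lemma foldl_if_add (l : List String) (c : String → Bool) (k a : Int) :
    l.foldl (fun s w => if c w then s + k else s) a
      = a + (l.map (fun w => if c w then k else (0 : Int))).sum := by
  induction l generalizing a with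
  | nil => simp
  | cons x t ih => simp only [List.foldl_cons, List.map_cons, List.sum_cons, ih]; split_ifs <;> ring

-- B's fused fold is the sum of three per-word contributions
lemma foldl_fused (l : List String) (c1 c2 c3 : String → Bool) (a : Int) :
    l.foldl
      (fun score w =>
        if c3 w then (if c2 w then (if c1 w then score + 3 else score) + 5
                      else (if c1 w then score + 3 else score)) + 10
        else (if c2 w then (if c1 w then score + 3 else score) + 5
              else (if c1 w then score + 3 else score))) a
      = a + (l.map (fun w => (if c1 w then (3 : Int) else 0) + (if c2 w then 5 else 0) + (if c3 w then 10 else 0))).sum := by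
  induction l generalizing a with
  | nil => simp
  | cons x t ih => simp only [List.foldl_cons, List.map_cons, List.sum_cons, ih]; split_ifs <;> ring

lemma sum_map_band (l : List String) (b : Bool) (c : String → Bool) (k : Int) :
    (l.map (fun w => if b && c w then k else (0 : Int))).sum
      = if b then (l.map (fun w => if c w then k else (0 : Int))).sum else 0 := by
  cases b <;> simp

-- the per-word conditions of A and B coincide
lemma condD_eq (word : String) :
    ((PySem.Str.find (PySem.Str.lower (cleanWord word)) "today" != -1) || (PySem.Str.find (PySem.Str.lower (cleanWord word)) "yesterday" != -1) || (PySem.Str.find (PySem.Str.lower (cleanWord word)) "tomorrow" != -1) || (PySem.Str.find (PySem.Str.lower (cleanWord word)) "night" != -1) || (PySem.Str.find (PySem.Str.lower (cleanWord word)) "day" != -1))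
      = ["today", "yesterday", "tomorrow", "night", "day"].any (fun h => PySem.Str.isIn h (cleanLower word)) := by
  simp [← lower_cleanWord, PySem.Str.isIn, find_bne_eq_isIn, Bool.or_assoc]

lemma condK_eq (word : String) :
    ((PySem.Str.find (PySem.Str.lower (cleanWord word)) "call" != -1) || (PySem.Str.find (PySem.Str.lower (cleanWord word)) "from" != -1))
      = ["call", "from"].any (fun h => PySem.Str.isIn h (cleanLower word)) := by
  simp [← lower_cleanWord, PySem.Str.isIn, find_bne_eq_isIn, Bool.or_assoc]

lemma condN_eq (word : String) :
    ((PySem.Str.find (PySem.Str.lower (cleanWord word)) "name" != -1) || (PySem.Str.find (PySem.Str.lower (cleanWord word)) "call" != -1) || (PySem.Str.find (PySem.Str.lower (cleanWord word)) "known" != -1))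
      = ["name", "call", "known"].any (fun h => PySem.Str.isIn h (cleanLower word)) := by
  simp [← lower_cleanWord, PySem.Str.isIn, find_bne_eq_isIn, Bool.or_assoc]

-- ===== VERDICT (by name: the statement is the Claim_ definition above) =====
theorem whatScore_spec : Claim_equal_whatScore := by
  intro qKeyWords paraLine ansNer pKeyWords _
  show whatScore qKeyWords paraLine ansNer pKeyWords = whatScore_alt qKeyWords paraLine ansNer pKeyWords
  rw [whatScore, whatScore_alt]
  simp only [flags_spec, Bool.false_or]
  rw [foldl_fused (wsSplit paraLine)
        (fun word => (qKeyWords.map PySem.Str.lower).any (fun w => ["month", "year", "date", "time"].contains w) && ["today", "yesterday", "tomorrow", "night", "day"].any (fun h => PySem.Str.isIn h (cleanLower word)))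
        (fun word => (qKeyWords.map PySem.Str.lower).contains "kind" && ["call", "from"].any (fun h => PySem.Str.isIn h (cleanLower word)))
        (fun word => (qKeyWords.map PySem.Str.lower).any (fun w => PySem.Str.isIn "name" w) && ["name", "call", "known"].any (fun h => PySem.Str.isIn h (cleanLower word)))]
  simp only [foldl_if_add, sum_map_band, condD_eq, condK_eq, condN_eq,
    PySem.List.sum_map_add_int, zero_add]
  have hk : ((qKeyWords.map PySem.Str.lower).contains "kind") = qKeyWords.any (fun w => PySem.Str.lower w == "kind") := by
    rw [List.contains_eq_any_beq, List.any_map]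
    exact List.any_congr rfl (fun a => by simp [eq_comm])
  have hd : ((qKeyWords.map PySem.Str.lower).any (fun w => ["month", "year", "date", "time"].contains w)) = qKeyWords.any (fun w => ["month", "year", "date", "time"].contains (PySem.Str.lower w)) := by
    rw [List.any_map]
    exact List.any_congr rfl (fun a => rfl)
  have hn : ((qKeyWords.map PySem.Str.lower).any (fun w => PySem.Str.isIn "name" w)) = qKeyWords.any (fun w => PySem.Str.isIn "name" (PySem.Str.lower w)) := by
    rw [List.any_map]
    exact List.any_congr rfl (fun a => rfl)
  rw [hk, hd, hn]
  split_ifs <;> ring
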